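-- pv_equiv track=rewrite | github.com/harris-2374/THEx | src/thexb/STAGE_percent_missing_DROPPED_FROM_PIPELINE.py | count_valid_chars
-- ===== SOURCE A (Python) =====
-- def count_valid_chars(s):
--     """Count all valid A, T, G, and C's.
--        Lowercase letters count as valid bases."""
--     valid_bases = ['a', 't', 'c', 'g']
--     valid_total = 0
--     for base in s:
--         if base.lower() in valid_bases:
--             valid_total += 1
--         else:
--             continue
--     return valid_total
-- ===== SOURCE B (Python) =====
-- def count_valid_chars(s):
--     """Count all valid A, T, G, and C's.
--        Lowercase letters count as valid bases."""
--     counts = {}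
--     for base in s:
--         b = base.lower()
--         counts[b] = counts.get(b, 0) + 1
--     return sum(counts.get(b, 0) for b in 'atcg')
-- ===== Notes on version B (the rewrite author's own statement) =====
-- stated objective: alternative
-- what changed: B builds a full histogram (dict) of the lowercased characters in one pass and then sums the entries for the four keys 'a','t','c','g', instead of A's per-character membership test against a list with a running total.
import Mathlib
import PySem

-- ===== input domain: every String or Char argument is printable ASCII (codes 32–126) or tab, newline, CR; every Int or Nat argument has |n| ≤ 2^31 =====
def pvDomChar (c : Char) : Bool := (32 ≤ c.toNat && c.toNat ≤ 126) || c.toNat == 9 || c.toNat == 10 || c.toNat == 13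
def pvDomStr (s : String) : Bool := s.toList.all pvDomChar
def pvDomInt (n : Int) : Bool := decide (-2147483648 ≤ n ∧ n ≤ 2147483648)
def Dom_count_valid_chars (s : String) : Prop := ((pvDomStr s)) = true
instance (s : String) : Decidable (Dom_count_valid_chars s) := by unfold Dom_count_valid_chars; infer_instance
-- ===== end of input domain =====

-- B replaces A's per-character membership test against ['a','t','c','g'] by a one-pass
-- histogram of the lowercased characters followed by a sum over the four keys (alternative
-- decomposition, same O(n) cost).

-- ===== PORT A =====
def count_valid_chars (s : String) : Int :=
  let valid_bases : List Char := ['a', 't', 'c', 'g']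
  s.toList.foldl
    (fun valid_total base =>
      if valid_bases.contains (PySem.Chars.lowerChar base) then valid_total + 1
      else valid_total)
    0

-- ===== PORT B =====
def count_valid_chars_alt (s : String) : Int :=
  let counts : PySem.Dict Char Int :=
    s.toList.foldl
      (fun counts base =>
        let b := PySem.Chars.lowerChar base
        counts.insert b (counts.getD b 0 + 1))
      PySem.Dict.empty
  "atcg".toList.foldl (fun acc b => acc + counts.getD b 0) 0

-- ===== PRECONDITION & SPEC =====
def Spec_count_valid_chars (s : String) (out : Int) : Prop := out = count_valid_chars_alt s
instance (s : String) (out : Int) : Decidable (Spec_count_valid_chars s out) := by unfold Spec_count_valid_chars; infer_instance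

-- ===== CLAIM (what is proved, stated in full; the proofs are below) =====
def Claim_equal_count_valid_chars : Prop := ∀ (s : String), Dom_count_valid_chars s → Spec_count_valid_chars s (count_valid_chars s)

-- ===== LEMMAS AND PROOFS =====

-- The histogram fold: looking up any key afterwards gives the old value plus the
-- number of occurrences of that key among the lowercased characters.
theorem histo_getD (l : List Char) (d : PySem.Dict Char Int) (c : Char) :
    (l.foldl
      (fun counts base =>
        let b := PySem.Chars.lowerChar base
        counts.insert b (counts.getD b 0 + 1)) d).getD c 0
    = d.getD c 0 + ((l.map PySem.Chars.lowerChar).count c : Int) := by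
  induction l generalizing d with
  | nil => simp
  | cons x xs ih =>
      simp only [List.foldl_cons, List.map_cons, List.count_cons, ih]
      rw [PySem.Dict.getD_insert]
      by_cases h : c = PySem.Chars.lowerChar x <;> simp [h, beq_iff_eq, Ne.symm] <;> ring

-- A's fold counts the characters whose lowercase form is one of the four bases;
-- that equals the sum of the four per-character counts of the lowercased list.
theorem acount (l : List Char) (acc : Int) :
    l.foldl
      (fun valid_total base =>
        if ([ 'a', 't', 'c', 'g'] : List Char).contains (PySem.Chars.lowerChar base)
        then valid_total + 1 else valid_total) acc
    = acc + ((l.map PySem.Chars.lowerChar).count 'a' : Int)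
        + ((l.map PySem.Chars.lowerChar).count 't' : Int)
        + ((l.map PySem.Chars.lowerChar).count 'c' : Int)
        + ((l.map PySem.Chars.lowerChar).count 'g' : Int) := by
  induction l generalizing acc with
  | nil => simp
  | cons x xs ih =>
      simp only [List.foldl_cons, List.map_cons, List.count_cons, ih]
      by_cases ha : PySem.Chars.lowerChar x = 'a' <;>
      by_cases ht : PySem.Chars.lowerChar x = 't' <;>
      by_cases hc : PySem.Chars.lowerChar x = 'c' <;>
      by_cases hg : PySem.Chars.lowerChar x = 'g' <;>
        simp_all <;> ring

-- ===== VERDICT (by name: the statement is the Claim_ definition above) =====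
theorem count_valid_chars_spec : Claim_equal_count_valid_chars := by
  intro s _
  show count_valid_chars s = count_valid_chars_alt s
  unfold count_valid_chars count_valid_chars_alt
  simp only [acount, histo_getD]
  simp [PySem.Dict.getD]
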